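-- pv_equiv track=rewrite | github.com/james-mumo/dsa-1 | py/algorithms/stacks/reverseWord.py | reverseMe
-- ===== SOURCE A (Python) =====
-- def reverseMe(word):
--     splitWord = word.split()
--     stack = []
--
--     for w in splitWord:
--         stack += w
--
--     reversedWord = ""
--
--     while stack:
--         reversedWord += stack.pop()
--
--     return reversedWord
-- ===== SOURCE B (Python) =====
-- def reverseMe(word):
--     out = []
--     for c in reversed(word):
--         if not c.isspace():
--             out.append(c)
--     return ''.join(out)
-- ===== Notes on version B (the rewrite author's own statement) =====
-- stated objective: faster
-- what changed: Replaced A's three phases (split into words, accumulate chars into a stack, pop the stack one char at a time with quadratic string concatenation) by a single filtering pass over the characters in reverse order collected into a list and joined once.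
import Mathlib
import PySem

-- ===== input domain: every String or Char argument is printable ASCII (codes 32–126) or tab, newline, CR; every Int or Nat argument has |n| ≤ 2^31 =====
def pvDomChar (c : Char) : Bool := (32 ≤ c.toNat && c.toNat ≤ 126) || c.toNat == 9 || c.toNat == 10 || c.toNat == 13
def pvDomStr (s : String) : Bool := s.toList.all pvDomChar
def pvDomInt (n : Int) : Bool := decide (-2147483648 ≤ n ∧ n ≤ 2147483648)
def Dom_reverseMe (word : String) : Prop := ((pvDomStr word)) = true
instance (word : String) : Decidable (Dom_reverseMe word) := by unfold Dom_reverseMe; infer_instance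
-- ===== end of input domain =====

-- B fuses A's split/stack/pop phases into one filtering pass over the reversed characters (idiomatic; return value only, no mutation involved).

-- ===== PORT A =====
-- while stack: reversedWord += stack.pop()   (pop takes the LAST element)
def reverseMePop (stack : List Char) (rev : List Char) : List Char :=
  if h : stack = [] then rev
  else reverseMePop stack.dropLast (rev ++ [stack.getLast h])
termination_by stack.length
decreasing_by
  cases stack with
  | nil => exact absurd rfl h
  | cons a t => simp

def reverseMe (word : String) : String :=
  let splitWord := PySem.Str.split₀ word
  let stack := splitWord.foldl (fun st w => st ++ w.toList) []
  String.ofList (reverseMePop stack [])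

-- ===== PORT B =====
def reverseMe_alt (word : String) : String :=
  String.ofList (word.toList.reverse.foldl
    (fun out c => if !PySem.Chars.isspace c then out ++ [c] else out) [])

-- ===== PRECONDITION & SPEC =====
def Spec_reverseMe (word : String) (out : String) : Prop := out = reverseMe_alt word
instance (word : String) (out : String) : Decidable (Spec_reverseMe word out) := by unfold Spec_reverseMe; infer_instance

-- ===== CLAIM (what is proved, stated in full; the proofs are below) =====
def Claim_equal_reverseMe : Prop := ∀ (word : String), Dom_reverseMe word → Spec_reverseMe word (reverseMe word)

-- ===== LEMMAS AND PROOFS =====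

-- A's pop loop appends the stack's reversal.
theorem reverseMePop_eq (st rev : List Char) : reverseMePop st rev = rev ++ st.reverse := by
  induction st using List.reverseRecOn generalizing rev with
  | nil => simp [reverseMePop]
  | append_singleton xs x ih =>
      rw [reverseMePop]
      simp [ih]

-- The characters of split()'s words, concatenated, are the non-whitespace characters.
theorem split₀_go_flatten (s cur : List Char) (acc : List (List Char)) :
    (PySem.Chars.split₀.go s cur acc).flatten =
      acc.reverse.flatten ++ cur.reverse ++ s.filter (fun c => !PySem.Chars.isspace c) := by
  induction s generalizing cur acc with
  | nil =>
      unfold PySem.Chars.split₀.go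
      by_cases h : cur = [] <;> simp [h]
  | cons c rest ih =>
      unfold PySem.Chars.split₀.go
      by_cases hs : PySem.Chars.isspace c
      · by_cases h : cur = [] <;> simp [hs, h, ih]
      · simp [hs, ih]

theorem split₀_flatten (cs : List Char) :
    (PySem.Chars.split₀ cs).flatten = cs.filter (fun c => !PySem.Chars.isspace c) := by
  simpa using split₀_go_flatten cs [] []

-- ===== VERDICT (by name: the statement is the Claim_ definition above) =====
theorem reverseMe_spec : Claim_equal_reverseMe := by
  intro word _
  unfold Spec_reverseMe reverseMe reverseMe_alt
  dsimp only
  have hB := PySem.List.foldl_append_if (fun c => !PySem.Chars.isspace c) id word.toList.reverse []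
  simp only [id_eq, List.map_id, List.nil_append] at hB
  have hstack : (PySem.Str.split₀ word).foldl (fun st w => st ++ w.toList) [] =
      word.toList.filter (fun c => !PySem.Chars.isspace c) := by
    rw [PySem.List.foldl_append_eq_flatMap String.toList (PySem.Str.split₀ word) []]
    rw [List.flatMap_def, PySem.Str.split₀_map_toList, split₀_flatten]
    simp
  rw [hB, hstack, reverseMePop_eq, List.filter_reverse]
  simp
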